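-- pv_equiv track=rewrite | github.com/ivancapobianco/gi-rag-tumor-board | processing/extract_s3_guidelines_dummy.py | chunk_by_heading
-- ===== SOURCE A (Python) =====
-- def chunk_by_heading(text, heading_marker="### "):
--     lines = text.splitlines()
--     chunks = []
--     current_chunk = []
--     for line in lines:
--         if line.startswith(heading_marker):
--             if current_chunk:
--                 chunks.append("\n".join(current_chunk))
--             current_chunk = [line]
--         else:
--             current_chunk.append(line)
--     if current_chunk:
--         chunks.append("\n".join(current_chunk))
--     return chunks
-- ===== SOURCE B (Python) =====
-- def chunk_by_heading(text, heading_marker="### "):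
--     chunks = []
--     rest = text.splitlines()
--     while rest:
--         # cut = index of the next heading line after position 0 (or len(rest))
--         cut = 1
--         while cut < len(rest) and not rest[cut].startswith(heading_marker):
--             cut += 1
--         chunks.append("\n".join(rest[:cut]))
--         rest = rest[cut:]
--     return chunks
-- ===== Notes on version B (the rewrite author's own statement) =====
-- stated objective: alternative
-- what changed: B is a staged cut-point scan: it repeatedly finds the index of the next heading line, emits the slice up to it as one chunk and continues on the remaining suffix, instead of A's single forward pass that flushes a current-chunk accumulator at each heading and at the end.
import Mathlib
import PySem

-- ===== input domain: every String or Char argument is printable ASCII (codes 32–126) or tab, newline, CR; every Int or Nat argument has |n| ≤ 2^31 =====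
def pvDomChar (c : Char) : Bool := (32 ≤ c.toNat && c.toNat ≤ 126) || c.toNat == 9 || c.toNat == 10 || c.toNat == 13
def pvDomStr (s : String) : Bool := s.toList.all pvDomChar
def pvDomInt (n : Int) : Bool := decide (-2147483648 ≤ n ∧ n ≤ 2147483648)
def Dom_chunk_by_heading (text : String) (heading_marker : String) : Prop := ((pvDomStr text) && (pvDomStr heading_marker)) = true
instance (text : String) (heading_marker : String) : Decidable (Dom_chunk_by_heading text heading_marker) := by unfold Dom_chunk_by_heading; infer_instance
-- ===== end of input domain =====

-- B replaces A's forward pass with a current-chunk accumulator by a staged cut-point scan: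
-- repeatedly find the index of the next heading line, emit the slice up to it as one chunk,
-- and continue on the remaining suffix; same cost, different decomposition ('alternative').

-- ===== PORT A =====
-- one step of A's loop: state = (chunks, current_chunk)
def pvStepA (m : String) (st : List String × List String) (line : String) :
    List String × List String :=
  if PySem.Str.startswith line m then
    ((if st.2 = [] then st.1 else st.1 ++ [PySem.Str.join "\n" st.2]), [line])
  else
    (st.1, st.2 ++ [line])

def chunk_by_heading (text : String) (heading_marker : String) : List String :=
  let lines := PySem.Str.splitlines text
  let res := lines.foldl (pvStepA heading_marker) ([], [])
  if res.2 = [] then res.1 else res.1 ++ [PySem.Str.join "\n" res.2]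

-- ===== PORT B =====
-- B's inner while loop: starting from cut = 1, advance cut past non-heading lines of the
-- tail; pvCutAux counts those tail lines, so cut = 1 + pvCutAux m rest.tail
def pvCutAux (m : String) : List String → Nat
  | [] => 0
  | l :: ls => if PySem.Str.startswith l m then 0 else pvCutAux m ls + 1

-- B's outer while loop: emit rest[:cut] as a chunk, continue on rest[cut:]
-- (rest[:cut] / rest[cut:] with 0 ≤ cut ≤ len(rest) are exactly List.take / List.drop)
def pvOuterB (m : String) (chunks : List String) (rest : List String) : List String :=
  match rest with
  | [] => chunks
  | l :: ls =>
      let cut := 1 + pvCutAux m ls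
      pvOuterB m (chunks ++ [PySem.Str.join "\n" ((l :: ls).take cut)]) ((l :: ls).drop cut)
termination_by rest.length
decreasing_by
  simp only [List.length_cons, List.length_drop]; omega

def chunk_by_heading_alt (text : String) (heading_marker : String) : List String :=
  pvOuterB heading_marker [] (PySem.Str.splitlines text)

-- ===== PRECONDITION & SPEC =====
def Spec_chunk_by_heading (text : String) (heading_marker : String) (out : List String) : Prop := out = chunk_by_heading_alt text heading_marker
instance (text : String) (heading_marker : String) (out : List String) : Decidable (Spec_chunk_by_heading text heading_marker out) := by unfold Spec_chunk_by_heading; infer_instance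

-- ===== CLAIM (what is proved, stated in full; the proofs are below) =====
def Claim_equal_chunk_by_heading : Prop := ∀ (text : String) (heading_marker : String), Dom_chunk_by_heading text heading_marker → Spec_chunk_by_heading text heading_marker (chunk_by_heading text heading_marker)

-- ===== LEMMAS AND PROOFS =====

-- proof-side characterisation: the prefix of lines before the first heading …
def pvPre (m : String) (ls : List String) : List String :=
  ls.takeWhile (fun l => !PySem.Str.startswith l m)

-- … and the chunks that start at heading lines
def pvTail (m : String) : List String → List String
  | [] => []
  | l :: ls =>
      if PySem.Str.startswith l m then
        PySem.Str.join "\n" (l :: pvPre m ls) :: pvTail m ls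
      else pvTail m ls

theorem pvPre_cons_pos (m l : String) (ls : List String)
    (h : PySem.Str.startswith l m = true) : pvPre m (l :: ls) = [] := by
  simp only [pvPre, List.takeWhile_cons, h]; rfl

theorem pvPre_cons_neg (m l : String) (ls : List String)
    (h : PySem.Str.startswith l m = false) : pvPre m (l :: ls) = l :: pvPre m ls := by
  simp only [pvPre, List.takeWhile_cons, h]; rfl

theorem pvTail_cons_pos (m l : String) (ls : List String)
    (h : PySem.Str.startswith l m = true) :
    pvTail m (l :: ls) = PySem.Str.join "\n" (l :: pvPre m ls) :: pvTail m ls := by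
  simp only [pvTail, h, if_pos]

theorem pvTail_cons_neg (m l : String) (ls : List String)
    (h : PySem.Str.startswith l m = false) : pvTail m (l :: ls) = pvTail m ls := by
  simp only [pvTail, h]; rfl

theorem pvA_char (m : String) (ls : List String) : ∀ (chunks cur : List String),
    (if (ls.foldl (pvStepA m) (chunks, cur)).2 = []
     then (ls.foldl (pvStepA m) (chunks, cur)).1
     else (ls.foldl (pvStepA m) (chunks, cur)).1
            ++ [PySem.Str.join "\n" (ls.foldl (pvStepA m) (chunks, cur)).2])
    = chunks ++ (if cur ++ pvPre m ls = [] then []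
                 else [PySem.Str.join "\n" (cur ++ pvPre m ls)]) ++ pvTail m ls := by
  induction ls with
  | nil =>
      intro chunks cur
      simp only [List.foldl_nil, pvPre, List.takeWhile_nil, pvTail, List.append_nil]
      rcases cur with _ | ⟨c, cs⟩ <;> simp
  | cons l ls ih =>
      intro chunks cur
      rcases h : PySem.Str.startswith l m with _ | _
      · -- not a heading: extend the current chunk
        simp only [List.foldl_cons, pvStepA, h, Bool.false_eq_true, if_false,
          pvPre_cons_neg m l ls h, pvTail_cons_neg m l ls h]
        rw [ih chunks (cur ++ [l])]
        simp [List.append_assoc]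
      · -- a heading: flush the current chunk (if non-empty), start a new one
        simp only [List.foldl_cons, pvStepA, h, if_true,
          pvPre_cons_pos m l ls h, pvTail_cons_pos m l ls h]
        rw [ih (if cur = [] then chunks else chunks ++ [PySem.Str.join "\n" cur]) [l]]
        rcases cur with _ | ⟨c, cs⟩ <;> simp

-- the inner-loop count is the length of the non-heading prefix, so B's slices are
-- exactly take/drop of takeWhile/dropWhile
theorem pvCutAux_cons_pos (m l : String) (ls : List String)
    (h : PySem.Str.startswith l m = true) : pvCutAux m (l :: ls) = 0 := by
  simp only [pvCutAux, h, if_pos]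

theorem pvCutAux_cons_neg (m l : String) (ls : List String)
    (h : PySem.Str.startswith l m = false) : pvCutAux m (l :: ls) = pvCutAux m ls + 1 := by
  simp only [pvCutAux, h]; rfl

theorem pvTakeDrop_pre (m : String) (ls : List String) :
    ls.take (pvCutAux m ls) = pvPre m ls ∧
      ls.drop (pvCutAux m ls) = ls.dropWhile (fun l => !PySem.Str.startswith l m) := by
  induction ls with
  | nil => simp [pvCutAux, pvPre]
  | cons l ls ih =>
      rcases h : PySem.Str.startswith l m with _ | _
      · rw [pvCutAux_cons_neg m l ls h, pvPre_cons_neg m l ls h]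
        constructor
        · rw [List.take_succ_cons, ih.1]
        · rw [List.drop_succ_cons, ih.2, List.dropWhile_cons, h]
          rfl
      · rw [pvCutAux_cons_pos m l ls h, pvPre_cons_pos m l ls h]
        constructor
        · rfl
        · rw [List.drop_zero, List.dropWhile_cons, h]
          rfl

theorem pvOuterB_cons (m : String) (cs : List String) (l : String) (ls : List String) :
    pvOuterB m cs (l :: ls)
      = pvOuterB m (cs ++ [PySem.Str.join "\n" ((l :: ls).take (1 + pvCutAux m ls))])
          ((l :: ls).drop (1 + pvCutAux m ls)) := by
  rw [pvOuterB.eq_def]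

-- B's outer loop, started at a heading boundary, produces exactly the heading chunks
theorem pvOuterB_tail (m : String) (ls : List String) : ∀ (cs : List String),
    pvOuterB m cs (ls.dropWhile (fun l => !PySem.Str.startswith l m)) = cs ++ pvTail m ls := by
  induction ls with
  | nil => intro cs; simp [pvOuterB, pvTail]
  | cons l ls ih =>
      intro cs
      rcases h : PySem.Str.startswith l m with _ | _
      · rw [List.dropWhile_cons, h, pvTail_cons_neg m l ls h]
        exact ih cs
      · rw [List.dropWhile_cons, h]
        simp only [Bool.not_true, Bool.false_eq_true, if_false]
        rw [pvOuterB_cons, pvTail_cons_pos m l ls h]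
        simp only [Nat.add_comm 1, List.take_succ_cons, List.drop_succ_cons,
          (pvTakeDrop_pre m ls).1, (pvTakeDrop_pre m ls).2]
        rw [ih]
        simp

-- ===== VERDICT (by name: the statement is the Claim_ definition above) =====
theorem chunk_by_heading_spec : Claim_equal_chunk_by_heading := by
  intro text m _
  unfold Spec_chunk_by_heading chunk_by_heading chunk_by_heading_alt
  have hA := pvA_char m (PySem.Str.splitlines text) [] []
  simp only [List.nil_append] at hA
  rw [hA]
  rcases hls : PySem.Str.splitlines text with _ | ⟨l, ls⟩
  · simp [pvOuterB, pvPre, pvTail]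
  · rcases h : PySem.Str.startswith l m with _ | _
    · -- first line is not a heading: B's first chunk is the leading block
      rw [pvPre_cons_neg m l ls h, pvTail_cons_neg m l ls h, pvOuterB_cons]
      simp only [Nat.add_comm 1, List.take_succ_cons, List.drop_succ_cons,
        (pvTakeDrop_pre m ls).1, (pvTakeDrop_pre m ls).2]
      rw [pvOuterB_tail]
      simp
    · -- first line is a heading: the list already starts at a boundary
      rw [pvPre_cons_pos m l ls h]
      have hd : (l :: ls).dropWhile (fun x => !PySem.Str.startswith x m) = l :: ls := by
        rw [List.dropWhile_cons, h]
        rfl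
      have hb := pvOuterB_tail m (l :: ls) []
      rw [hd, List.nil_append] at hb
      rw [hb]
      simp
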